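-- pv_equiv track=rewrite | github.com/RDvibe/Automatizaci-n-de-generaci-n-creativa-literaria-con-Python-y-GPT | psycho_machine.py | dividir_en_fragmentos
-- ===== SOURCE A (Python) =====
-- def dividir_en_fragmentos(historial, max_size=1024):
--     fragmento = []
--     size = 0
--     for entry in reversed(historial):
--         entry_size = len(entry) + 1  # +1 por el salto de línea
--         if size + entry_size > max_size:
--             break
--         fragmento.insert(0, entry)
--         size += entry_size
--     return fragmento
-- ===== SOURCE B (Python) =====
-- def dividir_en_fragmentos(historial, max_size=1024):
--     # Dual algorithm: compute the total size (with newlines) once, then advance an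
--     # index past front entries while the remaining total still exceeds max_size;
--     # what remains is the longest fitting suffix.
--     total = sum(len(e) + 1 for e in historial)
--     i = 0
--     n = len(historial)
--     while i < n and total > max_size:
--         total -= len(historial[i]) + 1
--         i += 1
--     return list(historial[i:])
-- ===== Notes on version B (the rewrite author's own statement) =====
-- stated objective: faster
-- what changed: B replaces A's backwards accumulate-until-overflow loop (building the result via insert(0,...)) with the dual algorithm: compute the total size once, then drop entries from the front while the total still exceeds max_size and return the remaining suffix in one slice; correct because entry sizes are positive, so A's result is exactly the longest suffix whose total fits.
import Mathlib
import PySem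

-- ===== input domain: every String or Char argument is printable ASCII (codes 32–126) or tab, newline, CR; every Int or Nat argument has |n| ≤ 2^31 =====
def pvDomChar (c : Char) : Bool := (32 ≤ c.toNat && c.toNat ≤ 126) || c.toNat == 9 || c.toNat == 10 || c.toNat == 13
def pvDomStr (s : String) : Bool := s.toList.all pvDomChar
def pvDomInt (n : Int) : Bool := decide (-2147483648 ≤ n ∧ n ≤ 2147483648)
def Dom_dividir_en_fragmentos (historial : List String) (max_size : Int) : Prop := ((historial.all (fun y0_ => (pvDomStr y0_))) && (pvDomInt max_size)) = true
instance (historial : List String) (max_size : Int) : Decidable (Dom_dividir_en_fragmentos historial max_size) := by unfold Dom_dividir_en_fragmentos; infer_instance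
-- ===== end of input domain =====

-- B is the dual algorithm: sum all sizes once, then drop entries from the front while the
-- total still exceeds max_size and return the remaining suffix (correct because entry sizes
-- are positive, so A keeps exactly the longest fitting suffix); objective: faster (no
-- per-element insert(0,...) rebuild).

-- ===== PORT A =====
-- the for-loop over reversed(historial) with break, carrying (fragmento, size);
-- fragmento.insert(0, entry) is cons
def dividir_go (entries : List String) (fragmento : List String) (size : Int) (max_size : Int) : List String :=
  match entries with
  | [] => fragmento
  | e :: rest =>
    let entry_size : Int := (PySem.Str.len e) + 1
    if size + entry_size > max_size then fragmento
    else dividir_go rest (e :: fragmento) (size + entry_size) max_size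

def dividir_en_fragmentos (historial : List String) (max_size : Int) : List String :=
  dividir_go historial.reverse [] 0 max_size

-- ===== PORT B =====
-- the while-loop advancing the index i: skip the current front entry while the running total exceeds max_size
def recortar_go (restante : List String) (total : Int) (max_size : Int) : List String :=
  match restante with
  | [] => []
  | e :: rest =>
    if total > max_size then recortar_go rest (total - ((PySem.Str.len e) + 1)) max_size
    else e :: rest

def dividir_en_fragmentos_alt (historial : List String) (max_size : Int) : List String :=
  recortar_go historial (historial.foldl (fun s e => s + ((PySem.Str.len e) + 1)) 0) max_size

-- ===== PRECONDITION & SPEC =====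
def Spec_dividir_en_fragmentos (historial : List String) (max_size : Int) (out : List String) : Prop := out = dividir_en_fragmentos_alt historial max_size
instance (historial : List String) (max_size : Int) (out : List String) : Decidable (Spec_dividir_en_fragmentos historial max_size out) := by unfold Spec_dividir_en_fragmentos; infer_instance

-- ===== CLAIM (what is proved, stated in full; the proofs are below) =====
def Claim_equal_dividir_en_fragmentos : Prop := ∀ (historial : List String) (max_size : Int), Dom_dividir_en_fragmentos historial max_size → Spec_dividir_en_fragmentos historial max_size (dividir_en_fragmentos historial max_size)

-- ===== LEMMAS AND PROOFS =====

-- total size (newline included) of a list of entries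
def pvS (l : List String) : Int := (l.map (fun e => (PySem.Str.len e) + 1)).sum

theorem pvS_nonneg (l : List String) : 0 ≤ pvS l := by
  induction l with
  | nil => simp [pvS]
  | cons e rest ih =>
    have : 0 ≤ PySem.Str.len e := by simp [PySem.Str.len]
    simp only [pvS, List.map_cons, List.sum_cons] at *
    omega

theorem pvS_cons (e : String) (l : List String) : pvS (e :: l) = (PySem.Str.len e + 1) + pvS l := by
  simp [pvS]

-- reference function: keep the longest fitting suffix
def pvKeep (l : List String) (max_size : Int) : List String :=
  match l with
  | [] => []
  | e :: rest => if pvS (e :: rest) ≤ max_size then e :: rest else pvKeep rest max_size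

-- the foldl in B's port computes pvS
theorem foldl_eq_pvS (l : List String) (a : Int) :
    l.foldl (fun s e => s + ((PySem.Str.len e) + 1)) a = a + pvS l := by
  induction l generalizing a with
  | nil => simp [pvS]
  | cons e rest ih => simp only [List.foldl_cons, ih, pvS_cons]; ring

-- B's loop equals the reference
theorem recortar_eq_keep (l : List String) (max_size : Int) :
    recortar_go l (pvS l) max_size = pvKeep l max_size := by
  induction l with
  | nil => simp [recortar_go, pvKeep]
  | cons e rest ih =>
    have harg : pvS (e :: rest) - ((PySem.Str.len e) + 1) = pvS rest := by rw [pvS_cons]; ring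
    simp only [recortar_go, pvKeep, harg]
    by_cases h : pvS (e :: rest) ≤ max_size
    · rw [if_neg (by omega), if_pos h]
    · rw [if_pos (by omega), if_neg h, ih]

-- A's loop ignores a trailing entry it can never reach
theorem dividir_go_append (l : List String) (e : String) (frag : List String) (size max_size : Int)
    (h : size + pvS l + (PySem.Str.len e + 1) > max_size) :
    dividir_go (l ++ [e]) frag size max_size = dividir_go l frag size max_size := by
  induction l generalizing frag size with
  | nil =>
    have h0 : pvS ([] : List String) = 0 := by simp [pvS]
    rw [h0] at h
    simp only [List.nil_append, dividir_go]
    rw [if_pos (by omega)]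
  | cons x xs ih =>
    simp only [List.cons_append, dividir_go]
    split_ifs with hx
    · rfl
    · exact ih _ _ (by rw [pvS_cons] at h; omega)

-- A's loop keeps everything when the whole tail fits
theorem dividir_go_all (l : List String) (frag : List String) (size max_size : Int)
    (h : size + pvS l ≤ max_size) :
    dividir_go l frag size max_size = l.reverse ++ frag := by
  induction l generalizing frag size with
  | nil => simp [dividir_go]
  | cons x xs ih =>
    have hx : 0 ≤ pvS xs := pvS_nonneg xs
    rw [pvS_cons] at h
    simp only [dividir_go]
    split_ifs with hc
    · omega
    · rw [ih _ _ (by omega)]; simp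

theorem pvS_reverse (l : List String) : pvS l.reverse = pvS l := by
  simp [pvS]

-- A's loop equals the reference
theorem dividir_eq_keep (l : List String) (max_size : Int) :
    dividir_go l.reverse [] 0 max_size = pvKeep l max_size := by
  induction l with
  | nil => simp [dividir_go, pvKeep]
  | cons e rest ih =>
    simp only [pvKeep]
    split_ifs with h
    · rw [dividir_go_all _ _ _ _ (by rw [pvS_reverse]; omega)]
      simp
    · rw [List.reverse_cons, dividir_go_append _ _ _ _ _ (by rw [pvS_reverse, pvS_cons] at *; omega)]
      exact ih

-- ===== VERDICT (by name: the statement is the Claim_ definition above) =====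
theorem dividir_en_fragmentos_spec : Claim_equal_dividir_en_fragmentos := by
  intro historial max_size _
  show dividir_en_fragmentos historial max_size = dividir_en_fragmentos_alt historial max_size
  unfold dividir_en_fragmentos dividir_en_fragmentos_alt
  rw [foldl_eq_pvS, zero_add, recortar_eq_keep, dividir_eq_keep]
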